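-- pv_equiv track=rewrite | github.com/khiemledev/bag_ranking_crawler | bag_ranking_crawler/spiders_content/emier_crawl_content.py | get_measurements
-- ===== SOURCE A (Python) =====
-- def get_measurements(desc):
--     measurements = []
--     # lines = desc.split('\n')
--     lines = desc
--     i = 0
--     while i < len(lines):
--         if lines[i].strip() == '':
--             del lines[i]
--             continue
--         i += 1
--     lines.append('\n')
--     for i in range(len(lines) - 1):
--         line = lines[i]
--         if "measurement" in line.lower():
--             for j in range(i+1, len(lines)):
--                 line2 = lines[j].strip().lower()
--                 if line2 == '' or \
--                     'condition' in line2 or\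
--                     'material' in line2 or\
--                     'hardware' in line2 or\
--                         'colour' in line2:
--                     break
--                 measurements.append(line2)
--
--     return '\n'.join(measurements)
-- ===== SOURCE B (Python) =====
-- # Single backward pass: maintain the (reversed) block of stripped-lowered lines that
-- # follows the current line up to the next stop line, instead of rescanning forward
-- # from every "measurement" header. Note: A mutates its argument (del / append); B does not.
-- def get_measurements(desc):
--     parts = []
--     blk = []  # reversed block of stripped-lowered lines following the current line, up to the next stop line
--     for line in reversed([l for l in desc if l.strip() != '']):
--         low = line.strip().lower()
--         if 'measurement' in line.lower():
--             parts.append(blk[::-1])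
--         if ('condition' in low or 'material' in low
--                 or 'hardware' in low or 'colour' in low):
--             blk = []
--         else:
--             blk.append(low)
--     parts.reverse()
--     return '\n'.join(line for part in parts for line in part)
-- ===== Notes on version B (the rewrite author's own statement) =====
-- stated objective: alternative
-- what changed: Instead of deleting blanks in place and rescanning forward from every 'measurement' header, B filters blanks once and makes a single backward pass that maintains the block of stripped-lowered lines up to the next stop line, so each header just copies the ready-made block (avoids A's repeated forward scans and in-place mutation; not measurably faster on the benchmark inputs).
import Mathlib
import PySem

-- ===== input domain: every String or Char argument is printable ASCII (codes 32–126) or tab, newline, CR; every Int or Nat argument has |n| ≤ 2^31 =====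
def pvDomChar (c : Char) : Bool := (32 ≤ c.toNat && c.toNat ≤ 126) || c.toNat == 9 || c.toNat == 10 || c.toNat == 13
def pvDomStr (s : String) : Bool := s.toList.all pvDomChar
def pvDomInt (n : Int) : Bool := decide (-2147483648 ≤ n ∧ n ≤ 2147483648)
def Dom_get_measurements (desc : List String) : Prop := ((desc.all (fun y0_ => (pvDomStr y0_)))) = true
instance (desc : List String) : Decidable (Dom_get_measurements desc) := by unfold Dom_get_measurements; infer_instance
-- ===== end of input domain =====

-- B replaces A's in-place blank deletion + forward rescan from every 'measurement'
-- header by one filter and one backward pass maintaining the current block.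
-- A mutates its argument (del/append); B does not; the equivalence proved here
-- is about the return value only.

-- ===== PORT A =====
-- 'line2 == "" or "condition" in line2 or ...' (A's inner-loop break test)
def pyStopA (low : String) : Bool :=
  low == "" || PySem.Str.isIn "condition" low || PySem.Str.isIn "material" low ||
    PySem.Str.isIn "hardware" low || PySem.Str.isIn "colour" low

-- the while-loop: at lines[i], blank => del lines[i] (continue), else i += 1
def pyWhileDel : List String → List String
  | [] => []
  | l :: rest => if PySem.Str.strip l == "" then pyWhileDel rest else l :: pyWhileDel rest

-- inner for-loop over lines[j:], j = i+1.., with break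
def pyInnerA : List String → List String
  | [] => []
  | l :: rest =>
      let line2 := PySem.Str.lower (PySem.Str.strip l)
      if pyStopA line2 then [] else line2 :: pyInnerA rest

-- outer for-loop over i in range(len(lines) - 1): the last element is not visited
def pyOuterA : List String → List String
  | [] => []
  | l :: rest =>
      match rest with
      | [] => []
      | _ :: _ =>
          (if PySem.Str.isIn "measurement" (PySem.Str.lower l) then pyInnerA rest else []) ++
            pyOuterA rest

def get_measurements (desc : List String) : String :=
  let lines := pyWhileDel desc
  let lines := lines ++ ["\n"]
  PySem.Str.join "\n" (pyOuterA lines)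

-- ===== PORT B =====
-- 'condition' in low or 'material' in low or 'hardware' in low or 'colour' in low
def pyStopB (low : String) : Bool :=
  PySem.Str.isIn "condition" low || PySem.Str.isIn "material" low ||
    PySem.Str.isIn "hardware" low || PySem.Str.isIn "colour" low

-- one iteration of B's backward loop; state = (parts, blk)
def pyStepB (st : List (List String) × List String) (line : String) :
    List (List String) × List String :=
  let low := PySem.Str.lower (PySem.Str.strip line)
  let parts := if PySem.Str.isIn "measurement" (PySem.Str.lower line)
               then st.1 ++ [st.2.reverse] else st.1
  let blk := if pyStopB low then [] else st.2 ++ [low]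
  (parts, blk)

def get_measurements_alt (desc : List String) : String :=
  let kept := desc.filter (fun l => !(PySem.Str.strip l == ""))
  let st := kept.reverse.foldl pyStepB ([], [])
  let parts := st.1.reverse
  PySem.Str.join "\n" parts.flatten

-- ===== PRECONDITION & SPEC =====
def Spec_get_measurements (desc : List String) (out : String) : Prop := out = get_measurements_alt desc
instance (desc : List String) (out : String) : Decidable (Spec_get_measurements desc out) := by unfold Spec_get_measurements; infer_instance

-- ===== CLAIM (what is proved, stated in full; the proofs are below) =====
def Claim_equal_get_measurements : Prop := ∀ (desc : List String), Dom_get_measurements desc → Spec_get_measurements desc (get_measurements desc)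

-- ===== LEMMAS AND PROOFS =====

-- functional description shared by both sides
def blockOf : List String → List String
  | [] => []
  | l :: rest =>
      let low := PySem.Str.lower (PySem.Str.strip l)
      if pyStopB low then [] else low :: blockOf rest

def resF : List String → List String
  | [] => []
  | l :: rest =>
      (if PySem.Str.isIn "measurement" (PySem.Str.lower l) then blockOf rest else []) ++ resF rest

theorem lower_ne_empty (s : String) (h : s ≠ "") : PySem.Str.lower s ≠ "" := by
  intro h2
  apply h
  have h3 := congrArg String.toList h2
  simp [PySem.Chars.lower] at h3
  exact h3

theorem whileDel_eq_filter (xs : List String) :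
    pyWhileDel xs = xs.filter (fun l => !(PySem.Str.strip l == "")) := by
  induction xs with
  | nil => rfl
  | cons l rest ih =>
      simp only [pyWhileDel, List.filter_cons]
      by_cases h : PySem.Str.strip l == ""
      · simp [h, ih]
      · simp [h, ih]

theorem innerA_eq_blockOf (rest : List String)
    (hnb : ∀ l ∈ rest, PySem.Str.strip l ≠ "") :
    pyInnerA (rest ++ ["\n"]) = blockOf rest := by
  induction rest with
  | nil => decide
  | cons l rest ih =>
      have hl : PySem.Str.strip l ≠ "" := hnb l (by simp)
      have hlow : PySem.Str.lower (PySem.Str.strip l) ≠ "" := lower_ne_empty _ hl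
      have hbeq : (PySem.Str.lower (PySem.Str.strip l) == "") = false := by
        simpa using hlow
      have hAB : pyStopA (PySem.Str.lower (PySem.Str.strip l))
          = pyStopB (PySem.Str.lower (PySem.Str.strip l)) := by
        simp only [pyStopA, pyStopB, hbeq, Bool.false_or]
      simp only [List.cons_append, pyInnerA, blockOf, hAB]
      by_cases hs : pyStopB (PySem.Str.lower (PySem.Str.strip l)) = true
      · rw [if_pos hs, if_pos hs]
      · rw [if_neg hs, if_neg hs, ih (fun x hx => hnb x (by simp [hx]))]

theorem outerA_eq_resF (ks : List String)
    (hnb : ∀ l ∈ ks, PySem.Str.strip l ≠ "") :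
    pyOuterA (ks ++ ["\n"]) = resF ks := by
  induction ks with
  | nil => rfl
  | cons l rest ih =>
      simp only [List.cons_append, pyOuterA, resF]
      have hne : rest ++ ["\n"] ≠ [] := by simp
      cases hr : rest ++ ["\n"] with
      | nil => exact absurd hr hne
      | cons a tl =>
          simp only []
          rw [← hr]
          rw [innerA_eq_blockOf rest (fun x hx => hnb x (by simp [hx]))]
          rw [ih (fun x hx => hnb x (by simp [hx]))]

-- B's fold, peeled from the front of the (unreversed) list
def gB : List String → List (List String) × List String
  | [] => ([], [])
  | l :: rest => pyStepB (gB rest) l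

theorem foldl_reverse_eq_gB (ks : List String) :
    ks.reverse.foldl pyStepB ([], []) = gB ks := by
  induction ks with
  | nil => rfl
  | cons l rest ih =>
      simp only [List.reverse_cons, List.foldl_append, List.foldl_cons, List.foldl_nil, ih, gB]

theorem gB_spec (ks : List String) :
    (gB ks).2 = (blockOf ks).reverse ∧ (gB ks).1.reverse.flatten = resF ks := by
  induction ks with
  | nil => exact ⟨rfl, rfl⟩
  | cons l rest ih =>
      obtain ⟨h2, h1⟩ := ih
      simp only [gB, pyStepB, blockOf, resF]
      constructor
      · by_cases hs : pyStopB (PySem.Str.lower (PySem.Str.strip l)) = true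
        · rw [if_pos hs, if_pos hs]; rfl
        · rw [if_neg hs, if_neg hs, h2]; simp
      · by_cases hm : PySem.Str.isIn "measurement" (PySem.Str.lower l) = true
        · rw [if_pos hm, if_pos hm, h2]; simp [h1]
        · rw [if_neg hm, if_neg hm, h1]; simp

-- ===== VERDICT (by name: the statement is the Claim_ definition above) =====
theorem get_measurements_spec : Claim_equal_get_measurements := by
  intro desc _
  unfold Spec_get_measurements get_measurements get_measurements_alt
  simp only [whileDel_eq_filter, foldl_reverse_eq_gB]
  have hnb : ∀ l ∈ desc.filter (fun l => !(PySem.Str.strip l == "")),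
      PySem.Str.strip l ≠ "" := by
    intro l hl
    have := List.of_mem_filter hl
    simpa using this
  rw [outerA_eq_resF _ hnb, (gB_spec _).2]
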